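-- pv_equiv track=rewrite | github.com/JoshVarty/Rosalind | 015_Independent_Alleles.py | mate_pairs
-- ===== SOURCE A (Python) =====
-- def mate_pairs(parent1_gene1, parent1_gene2, parent2_gene1, parent2_gene2):
--
--     pairs = []
--
--     for p1g1 in parent1_gene1:
--         for p2g1 in parent2_gene1:
--             # Iterate over second gene
--             for p1g2 in parent1_gene2:
--                 for p2g2 in parent2_gene2:
--
--                     new_gene1 = sorted(p1g1 + p2g1)
--                     new_gene2 = sorted(p1g2 + p2g2)
--                     pairs.append((new_gene1, new_gene2))
--
--     # There are two children, so we double the pairs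
--     return pairs * 2
-- ===== SOURCE B (Python) =====
-- def mate_pairs(parent1_gene1, parent1_gene2, parent2_gene1, parent2_gene2):
--     gene1_combos = [sorted(a + b) for a in parent1_gene1 for b in parent2_gene1]
--     gene2_combos = [sorted(c + d) for c in parent1_gene2 for d in parent2_gene2]
--     pairs = [(g1, g2) for g1 in gene1_combos for g2 in gene2_combos]
--     return pairs * 2
-- ===== Notes on version B (the rewrite author's own statement) =====
-- stated objective: alternative
-- what changed: B precomputes the gene1 and gene2 combination lists once (each gene combo sorted exactly once) and emits the pairs as a Cartesian product of the two lists, instead of A's 4-deep nested loop that re-sorts both gene combos for every pair.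
import Mathlib
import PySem

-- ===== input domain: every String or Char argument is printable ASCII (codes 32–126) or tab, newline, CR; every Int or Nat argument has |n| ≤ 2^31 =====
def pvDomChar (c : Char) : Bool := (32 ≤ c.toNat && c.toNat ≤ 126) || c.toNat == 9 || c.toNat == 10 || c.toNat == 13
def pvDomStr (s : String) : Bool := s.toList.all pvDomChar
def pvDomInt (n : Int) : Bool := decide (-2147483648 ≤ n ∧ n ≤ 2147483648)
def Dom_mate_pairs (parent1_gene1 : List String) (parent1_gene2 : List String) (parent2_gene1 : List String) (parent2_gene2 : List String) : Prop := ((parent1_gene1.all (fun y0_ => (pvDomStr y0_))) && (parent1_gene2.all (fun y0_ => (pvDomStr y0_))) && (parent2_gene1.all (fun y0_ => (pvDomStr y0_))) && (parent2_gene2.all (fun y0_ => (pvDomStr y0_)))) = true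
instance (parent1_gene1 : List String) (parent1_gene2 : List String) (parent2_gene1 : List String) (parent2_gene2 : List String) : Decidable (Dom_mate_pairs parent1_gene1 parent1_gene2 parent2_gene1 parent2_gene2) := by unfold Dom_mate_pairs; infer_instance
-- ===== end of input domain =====

-- B precomputes the two gene-combination lists once and emits the pairs as their Cartesian product,
-- instead of A's 4-deep nested loop that re-sorts each gene combo per pair; same exact output.


-- ===== PORT A =====
-- sorted(s1 + s2) in Python: iterating a string yields its 1-char strings, sorted by string order
def pvSortedCat (s1 s2 : String) : List String :=
  PySem.List.sorted ((s1 ++ s2).toList.map (fun c => String.ofList [c])) (fun s => s) false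

def mate_pairs (parent1_gene1 : List String) (parent1_gene2 : List String) (parent2_gene1 : List String) (parent2_gene2 : List String) : List (List String × List String) :=
  let pairs : List (List String × List String) :=
    parent1_gene1.foldl (fun acc p1g1 =>
      parent2_gene1.foldl (fun acc p2g1 =>
        parent1_gene2.foldl (fun acc p1g2 =>
          parent2_gene2.foldl (fun acc p2g2 =>
            acc ++ [(pvSortedCat p1g1 p2g1, pvSortedCat p1g2 p2g2)]) acc) acc) acc) []
  pairs ++ pairs

-- ===== PORT B =====
def mate_pairs_alt (parent1_gene1 : List String) (parent1_gene2 : List String) (parent2_gene1 : List String) (parent2_gene2 : List String) : List (List String × List String) :=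
  let gene1_combos : List (List String) :=
    parent1_gene1.flatMap (fun a => parent2_gene1.map (fun b => pvSortedCat a b))
  let gene2_combos : List (List String) :=
    parent1_gene2.flatMap (fun c => parent2_gene2.map (fun d => pvSortedCat c d))
  let pairs : List (List String × List String) :=
    gene1_combos.flatMap (fun g1 => gene2_combos.map (fun g2 => (g1, g2)))
  pairs ++ pairs

-- ===== PRECONDITION & SPEC =====
def Spec_mate_pairs (parent1_gene1 : List String) (parent1_gene2 : List String) (parent2_gene1 : List String) (parent2_gene2 : List String) (out : List (List String × List String)) : Prop := out = mate_pairs_alt parent1_gene1 parent1_gene2 parent2_gene1 parent2_gene2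
instance (parent1_gene1 : List String) (parent1_gene2 : List String) (parent2_gene1 : List String) (parent2_gene2 : List String) (out : List (List String × List String)) : Decidable (Spec_mate_pairs parent1_gene1 parent1_gene2 parent2_gene1 parent2_gene2 out) := by unfold Spec_mate_pairs; infer_instance

-- ===== CLAIM (what is proved, stated in full; the proofs are below) =====
def Claim_equal_mate_pairs : Prop := ∀ (parent1_gene1 : List String) (parent1_gene2 : List String) (parent2_gene1 : List String) (parent2_gene2 : List String), Dom_mate_pairs parent1_gene1 parent1_gene2 parent2_gene1 parent2_gene2 → Spec_mate_pairs parent1_gene1 parent1_gene2 parent2_gene1 parent2_gene2 (mate_pairs parent1_gene1 parent1_gene2 parent2_gene1 parent2_gene2)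

-- ===== LEMMAS AND PROOFS =====
-- A's nested append-loops collapse to nested flatMaps, which B's factored product re-associates.
theorem mate_pairs_eq_alt (p11 p12 p21 p22 : List String) :
    mate_pairs p11 p12 p21 p22 = mate_pairs_alt p11 p12 p21 p22 := by
  unfold mate_pairs mate_pairs_alt
  simp only [PySem.List.foldl_append_singleton_eq_map, PySem.List.foldl_append_eq_flatMap,
    List.flatMap_assoc, List.map_flatMap, List.flatMap_map, List.map_map, List.nil_append, Function.comp_def]

-- ===== VERDICT (by name: the statement is the Claim_ definition above) =====
theorem mate_pairs_spec : Claim_equal_mate_pairs := by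
  intro p11 p12 p21 p22 _
  exact (mate_pairs_eq_alt p11 p12 p21 p22).symm ▸ rfl
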